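-- pv_equiv track=rewrite | github.com/ggesh/beguiled | beguiled.py | beguile
-- ===== SOURCE A (Python) =====
-- def beguile(code):
--     code = cleanup(code)
--     lib = ['>','<','+','-','[',']','.',',']
--     octc = ''
--     beguiled = ''
--     for i in range(len(code)): octc = octc + str(lib.index(code[i]))
--     for i in range(len(octc)):
--         if i%2 == 0:
--             for j in range(3): lib[j], lib[7-j] = lib[7-j], lib[j]
--         else: lib.insert(0, lib.pop())
--         beguiled = beguiled + lib[int(octc[i])]
--     return beguiled
--
-- def cleanup(code):
--   return ''.join(filter(lambda x: x in ['.', ',', '[', ']', '<', '>', '+', '-'], code))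
-- ===== SOURCE B (Python) =====
-- def cleanup(code):
--   return ''.join(filter(lambda x: x in ['.', ',', '[', ']', '<', '>', '+', '-'], code))
--
-- _BASE = '><+-[].,'
-- # The obfuscation table's evolution is input-independent and periodic with
-- # period 12; _CYCLE[r] is the table in effect at every position i with i % 12 == r.
-- _CYCLE = [
--     ",.]-[+<>",
--     ">,.]-[+<",
--     "<+[]-.,>",
--     "><+[]-.,",
--     ",.-[]+<>",
--     ">,.-[]+<",
--     "<+]-[.,>",
--     "><+]-[.,",
--     ",.[]-+<>",
--     ">,.[]-+<",
--     "<+-[].,>",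
--     "><+-[].,",
-- ]
--
-- def beguile(code):
--     return ''.join(_CYCLE[i % 12][_BASE.index(ch)]
--                    for i, ch in enumerate(cleanup(code)))
-- ===== Notes on version B (the rewrite author's own statement) =====
-- stated objective: alternative
-- what changed: B does not simulate the table mutations at all: because A's swap/rotate transform sequence is input-independent and periodic with period 12, B precomputes the 12 resulting tables once and emits CYCLE[i % 12][BASE.index(ch)] in a single comprehension, dropping A's octal digit string and its per-character permutation updates entirely.
import Mathlib
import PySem

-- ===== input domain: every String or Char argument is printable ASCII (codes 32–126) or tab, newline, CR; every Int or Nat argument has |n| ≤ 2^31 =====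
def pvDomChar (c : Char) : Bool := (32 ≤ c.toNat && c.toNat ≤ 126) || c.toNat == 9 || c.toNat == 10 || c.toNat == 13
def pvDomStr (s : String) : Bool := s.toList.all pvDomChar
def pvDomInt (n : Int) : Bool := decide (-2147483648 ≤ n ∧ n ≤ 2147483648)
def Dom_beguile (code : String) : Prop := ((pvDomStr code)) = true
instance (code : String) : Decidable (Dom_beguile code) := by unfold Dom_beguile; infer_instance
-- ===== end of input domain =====

-- B replaces A's per-character table mutation with a precomputed period-12 table cycle
-- looked up by position mod 12; alternative algorithm, same return value on every input.

-- ===== PORT A =====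
-- cleanup: ''.join(filter(lambda x: x in [...], code)); strings ported via List Char (PySem.Chars)
def pvCleanup (code : String) : List Char :=
  code.toList.filter (fun x => ['.', ',', '[', ']', '<', '>', '+', '-'].contains x)

def bgLib0 : List Char := ['>', '<', '+', '-', '[', ']', '.', ',']

-- one swap lib[j], lib[7-j] = lib[7-j], lib[j]  (indices always in range: lib keeps 8 elements)
def bgSwap (lib : List Char) (j : Int) : List Char :=
  let a := PySem.List.pyGetD lib j ' '
  let b := PySem.List.pyGetD lib (7 - j) ' '
  PySem.List.pySetD (PySem.List.pySetD lib j b) (7 - j) a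

def beguile (code : String) : String :=
  let codeL := pvCleanup code
  -- first loop: octc = octc + str(lib.index(code[i])) over i in range(len(code))
  let octc := codeL.foldl
    (fun acc c => acc ++ PySem.Int.toChars (((PySem.List.index? bgLib0 c).getD 0 : Nat) : Int)) []
  -- second loop over i in range(len(octc)) reading octc[i]
  let r := (PySem.List.pyRange 0 (octc.length : Int) 1).foldl
    (fun (st : List Char × List Char) i =>
      let lib :=
        if PySem.Int.mod i 2 == 0 then
          (PySem.List.pyRange 0 3 1).foldl bgSwap st.1
        else
          match PySem.List.pop? st.1 (-1) with   -- lib.pop(); never empty here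
          | some (x, rest) => PySem.List.insert rest 0 x
          | none => st.1
      let d := (PySem.Int.ofChars? [PySem.List.pyGetD octc i ' ']).getD 0  -- int(octc[i])
      (lib, st.2 ++ [PySem.List.pyGetD lib d ' ']))
    (bgLib0, [])
  String.mk r.2

-- ===== PORT B =====
def altBase : List Char := ['>', '<', '+', '-', '[', ']', '.', ',']

-- _CYCLE: the 12 precomputed tables (table in effect at positions i with i % 12 == r)
def altCycle : List (List Char) :=
  [[',', '.', ']', '-', '[', '+', '<', '>'],
   ['>', ',', '.', ']', '-', '[', '+', '<'],
   ['<', '+', '[', ']', '-', '.', ',', '>'],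
   ['>', '<', '+', '[', ']', '-', '.', ','],
   [',', '.', '-', '[', ']', '+', '<', '>'],
   ['>', ',', '.', '-', '[', ']', '+', '<'],
   ['<', '+', ']', '-', '[', '.', ',', '>'],
   ['>', '<', '+', ']', '-', '[', '.', ','],
   [',', '.', '[', ']', '-', '+', '<', '>'],
   ['>', ',', '.', '[', ']', '-', '+', '<'],
   ['<', '+', '-', '[', ']', '.', ',', '>'],
   ['>', '<', '+', '-', '[', ']', '.', ',']]

-- _CYCLE[i % 12][_BASE.index(ch)]  (indices always in range for cleaned characters)
def altEmit (p : Int × Char) : Char :=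
  PySem.List.pyGetD (PySem.List.pyGetD altCycle (PySem.Int.mod p.1 12) [])
    (((PySem.List.index? altBase p.2).getD 0 : Nat) : Int) ' '

def beguile_alt (code : String) : String :=
  String.mk ((PySem.List.enumerate (pvCleanup code) 0).map altEmit)

-- ===== PRECONDITION & SPEC =====
def Spec_beguile (code : String) (out : String) : Prop := out = beguile_alt code
instance (code : String) (out : String) : Decidable (Spec_beguile code out) := by unfold Spec_beguile; infer_instance

-- ===== CLAIM (what is proved, stated in full; the proofs are below) =====
def Claim_equal_beguile : Prop := ∀ (code : String), Dom_beguile code → Spec_beguile code (beguile code)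


-- ===== LEMMAS AND PROOFS =====

-- the eight brainfuck symbols (the membership test of cleanup)
def bgAllowed : List Char := ['.', ',', '[', ']', '<', '>', '+', '-']

-- the digit character str(lib.index(c)) that A stores in octc
def digc (c : Char) : Char := Char.ofNat (48 + (PySem.List.index? bgLib0 c).getD 0)

-- one iteration of A's second loop, on the pair (index, octc character)
def stepA (st : List Char × List Char) (p : Int × Char) : List Char × List Char :=
  let lib :=
    if PySem.Int.mod p.1 2 == 0 then
      (PySem.List.pyRange 0 3 1).foldl bgSwap st.1
    else
      match PySem.List.pop? st.1 (-1) with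
      | some (x, rest) => PySem.List.insert rest 0 x
      | none => st.1
  let d := (PySem.Int.ofChars? [p.2]).getD 0
  (lib, st.2 ++ [PySem.List.pyGetD lib d ' '])

-- the table A's loop holds BEFORE processing position k (= altCycle[(k+11) % 12])
def prevLib (k : Nat) : List Char :=
  PySem.List.pyGetD altCycle (((k + 11) % 12 : Nat) : Int) []

theorem char_facts (c : Char) (hc : c ∈ bgAllowed) :
    PySem.Int.toChars (((PySem.List.index? bgLib0 c).getD 0 : Nat) : Int) = [digc c] ∧
      (PySem.Int.ofChars? [digc c]).getD 0
        = (((PySem.List.index? altBase c).getD 0 : Nat) : Int) := by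
  fin_cases hc <;> exact ⟨by decide, by decide⟩

theorem octc_eq (cs acc : List Char) (h : ∀ c ∈ cs, c ∈ bgAllowed) :
    cs.foldl
      (fun acc c => acc ++ PySem.Int.toChars (((PySem.List.index? bgLib0 c).getD 0 : Nat) : Int))
      acc = acc ++ cs.map digc := by
  induction cs generalizing acc with
  | nil => simp
  | cons c cs ih =>
    have h1 := (char_facts c (h c (List.mem_cons_self))).1
    simp only [List.foldl_cons, h1, List.map_cons]
    rw [ih _ (fun x hx => h x (List.mem_cons_of_mem _ hx))]
    simp

theorem enumerate_map {a b : Type} (f : a → b) (xs : List a) (s : Int) :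
    PySem.List.enumerate (xs.map f) s
      = (PySem.List.enumerate xs s).map (fun p => (p.1, f p.2)) := by
  induction xs generalizing s with
  | nil => simp [PySem.List.enumerate_nil]
  | cons c cs ih => simp [PySem.List.enumerate_cons, ih]

theorem foldA_enum (xs : List Char) (init : List Char × List Char) :
    (PySem.List.pyRange 0 (xs.length : Int) 1).foldl
      (fun (st : List Char × List Char) i =>
        let lib :=
          if PySem.Int.mod i 2 == 0 then
            (PySem.List.pyRange 0 3 1).foldl bgSwap st.1
          else
            match PySem.List.pop? st.1 (-1) with
            | some (x, rest) => PySem.List.insert rest 0 x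
            | none => st.1
        let d := (PySem.Int.ofChars? [PySem.List.pyGetD xs i ' ']).getD 0
        (lib, st.2 ++ [PySem.List.pyGetD lib d ' '])) init
      = (PySem.List.enumerate xs 0).foldl stepA init := by
  rw [PySem.List.enumerate_eq_map_pyRange (d := ' '), List.foldl_map]
  simp only [PySem.List.len_eq]
  rfl

-- one step of A, started from the phase-k table, lands on the phase-(k+1) table and
-- emits exactly B's character altEmit (k, c)
set_option maxHeartbeats 1000000 in
theorem key_step (k : Nat) (c : Char) (hc : c ∈ bgAllowed) (acc : List Char) :
    stepA (prevLib k, acc) ((k : Nat), digc c)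
      = (prevLib (k + 1), acc ++ [altEmit ((k : Nat), c)]) := by
  have hd := (char_facts c hc).2
  have hm2 : PySem.Int.mod (k : Nat) 2 = ((k % 2 : Nat) : Int) := by
    exact_mod_cast PySem.Int.mod_natCast k 2
  have hm12 : PySem.Int.mod (k : Nat) 12 = ((k % 12 : Nat) : Int) := by
    exact_mod_cast PySem.Int.mod_natCast k 12
  have h2 : k % 2 = (k % 12) % 2 := (Nat.mod_mod_of_dvd k (by norm_num)).symm
  have h11 : (k + 11) % 12 = (k % 12 + 11) % 12 := by omega
  have h12 : (k + 1 + 11) % 12 = k % 12 := by omega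
  unfold stepA altEmit prevLib
  simp only [hd, hm2, hm12, h2, h11, h12]
  have hlt : k % 12 < 12 := Nat.mod_lt _ (by norm_num)
  interval_cases (k % 12) <;>
    exact congrArg
      (fun L => (L, acc ++ [PySem.List.pyGetD L
        (((PySem.List.index? altBase c).getD 0 : Nat) : Int) ' '])) (by decide)

theorem main_fold (cs : List Char) (k : Nat) (acc : List Char)
    (hall : ∀ c ∈ cs, c ∈ bgAllowed) :
    ((PySem.List.enumerate cs (k : Nat)).foldl
        (fun st p => stepA st (p.1, digc p.2)) (prevLib k, acc)).2
      = acc ++ (PySem.List.enumerate cs (k : Nat)).map altEmit := by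
  induction cs generalizing k acc with
  | nil => simp [PySem.List.enumerate_nil]
  | cons c cs ih =>
    simp only [PySem.List.enumerate_cons, List.foldl_cons, List.map_cons]
    rw [key_step k c (hall c (List.mem_cons_self)) acc]
    have hcast : ((k : Nat) : Int) + 1 = ((k + 1 : Nat) : Int) := by push_cast; ring
    rw [hcast, ih (k + 1) _ (fun x hx => hall x (List.mem_cons_of_mem _ hx))]
    simp

-- ===== VERDICT (by name: the statement is the Claim_ definition above) =====
theorem beguile_spec : Claim_equal_beguile := by
  intro code _
  simp only [Spec_beguile, beguile, beguile_alt]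
  have hall : ∀ c ∈ pvCleanup code, c ∈ bgAllowed := by
    intro c hc
    have := (List.mem_filter.mp hc).2
    simpa [bgAllowed] using this
  rw [octc_eq _ _ hall, List.nil_append, foldA_enum, enumerate_map, List.foldl_map]
  have h0 : (bgLib0, ([] : List Char)) = (prevLib 0, ([] : List Char)) := by decide
  rw [h0]
  have := main_fold (pvCleanup code) 0 [] hall
  simp only [Nat.cast_zero] at this
  rw [this]
  simp
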